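-- pv_equiv track=rewrite | github.com/snu-mllab/GuidedQuant | any_precision/quantization/full_utils_v1.py | split_long_texts
-- ===== SOURCE A (Python) =====
-- from typing import Sequence
--
-- def split_long_texts(inputs: Sequence[str], split_max_length: int):
--     """Split examples that exceed split_max_length into multiple sub-examples"""
--     outputs = []
--     for index, input_str in enumerate(inputs):
--         while True:
--             truncation_index = input_str.find("\n", split_max_length)
--             if truncation_index == -1:
--                 outputs.append(input_str)
--                 break
--             outputs.append(input_str[:truncation_index])
--             input_str = input_str[truncation_index + 1 :]  # continue after \n
--     return outputs
-- ===== SOURCE B (Python) =====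
-- def split_long_texts(inputs, split_max_length):
--     """Split examples that exceed split_max_length into multiple sub-examples.
--
--     Single pass: split each input once at newlines, then regroup the lines,
--     cutting a chunk as soon as its joined length reaches split_max_length.
--     """
--     outputs = []
--     for input_str in inputs:
--         cur = []
--         acc_len = 0
--         for line in input_str.split("\n"):
--             if cur and acc_len >= split_max_length:
--                 outputs.append("\n".join(cur))
--                 cur = []
--                 acc_len = 0
--             if cur:
--                 acc_len += 1
--             cur.append(line)
--             acc_len += len(line)
--         outputs.append("\n".join(cur))
--     return outputs
-- ===== Notes on version B (the rewrite author's own statement) =====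
-- stated objective: alternative
-- what changed: Replaces A's repeated str.find scans over shrinking suffix copies with a single split('\n') followed by one regrouping pass that maintains the running chunk length.
-- outside the precondition, e.g. on split_long_texts(['ab\ncd'], -2): A returns ['ab\ncd'], B returns ['ab', 'cd']
import Mathlib
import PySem

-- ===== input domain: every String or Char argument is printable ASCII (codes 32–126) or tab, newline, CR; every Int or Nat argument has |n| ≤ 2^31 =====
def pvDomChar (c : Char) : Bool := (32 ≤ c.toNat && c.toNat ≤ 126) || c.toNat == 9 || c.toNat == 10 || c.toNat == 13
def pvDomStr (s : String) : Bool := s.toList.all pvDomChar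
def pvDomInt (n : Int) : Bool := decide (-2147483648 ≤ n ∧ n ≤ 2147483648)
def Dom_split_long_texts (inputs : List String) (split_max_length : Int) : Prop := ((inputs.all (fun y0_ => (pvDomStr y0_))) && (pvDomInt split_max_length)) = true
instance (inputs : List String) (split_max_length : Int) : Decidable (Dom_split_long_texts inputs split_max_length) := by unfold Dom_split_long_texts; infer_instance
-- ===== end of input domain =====

-- B regroups the once-split lines in one pass instead of A's repeated find-scans over shrinking
-- suffix copies; equality is proved for non-negative split_max_length.

-- ===== PORT A =====
-- termination lemma for A's inner while loop (cited by pvWhileA's decreasing_by)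
lemma pvFindFrom_bounds (s : List Char) (m : Int)
    (h : PySem.Chars.findFrom s ['\n'] m none ≠ -1) :
    0 ≤ PySem.Chars.findFrom s ['\n'] m none ∧
      (PySem.Chars.findFrom s ['\n'] m none).toNat < s.length := by
  have hnat : ∀ k : Nat, PySem.Chars.findFrom s ['\n'] (k : Int) none ≠ -1 →
      0 ≤ PySem.Chars.findFrom s ['\n'] (k : Int) none ∧
        (PySem.Chars.findFrom s ['\n'] (k : Int) none).toNat < s.length := by
    intro k hk
    rcases Nat.lt_or_ge s.length k with hlt | hle
    · exfalso
      apply hk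
      simp only [PySem.Chars.findFrom]
      norm_num
      intro h2
      omega
    · obtain ⟨h1, h2, _⟩ := PySem.Chars.findFrom_natCast_spec s ['\n'] k hle hk
      obtain ⟨u, hu⟩ := h2
      have hlen := congrArg List.length hu
      simp [List.length_drop] at hlen
      exact ⟨by omega, by omega⟩
  rcases Int.lt_or_le m 0 with hm | hm
  · have hshift : PySem.Chars.findFrom s ['\n'] m none
        = PySem.Chars.findFrom s ['\n'] (((m + s.length).toNat : Nat) : Int) none := by
      simp only [PySem.Chars.findFrom]
      have h1 : (if m < 0 then if m + (s.length : Int) < 0 then 0 else m + s.length else m)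
          = (((m + s.length).toNat : Nat) : Int) := by split_ifs <;> omega
      rw [h1]
      have h2 : (if ((((m + ↑s.length).toNat : Nat) : Int)) < 0 then
          (if (((m + ↑s.length).toNat : Nat) : Int) + (s.length : Int) < 0 then 0
            else ((((m + ↑s.length).toNat : Nat) : Int)) + s.length)
          else ((((m + ↑s.length).toNat : Nat) : Int))) = (((m + s.length).toNat : Nat) : Int) := by
        split_ifs <;> omega
      rw [h2]
    rw [hshift] at h ⊢
    exact hnat _ h
  · obtain ⟨k, rfl⟩ : ∃ k : Nat, m = (k : Int) := ⟨m.toNat, (Int.toNat_of_nonneg hm).symm⟩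
    exact hnat k h

-- the inner 'while True' loop of A: find '\n' from split_max_length, cut, continue after it
def pvWhileA (m : Int) (s : List Char) (outputs : List String) : List String :=
  if h : PySem.Chars.findFrom s ['\n'] m none = -1 then
    outputs ++ [String.ofList s]
  else
    pvWhileA m (PySem.List.slice s (some (PySem.Chars.findFrom s ['\n'] m none + 1)) none)
      (outputs ++ [String.ofList (PySem.List.slice s none (some (PySem.Chars.findFrom s ['\n'] m none)))])
termination_by s.length
decreasing_by
  have hb := pvFindFrom_bounds s m h
  rw [PySem.List.slice_from s (a := PySem.Chars.findFrom s ['\n'] m + 1) (by omega)]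
  simp only [List.length_drop]
  omega

def split_long_texts (inputs : List String) (split_max_length : Int) : List String :=
  inputs.foldl (fun outputs input_str => pvWhileA split_max_length input_str.toList outputs) []

-- ===== PORT B =====
-- one fold step of B's line loop: maybe emit the current chunk, then append the line
def pvStepB (m : Int) (st : List String × List (List Char) × Int) (line : List Char) :
    List String × List (List Char) × Int :=
  let s1 := if st.2.1 ≠ [] ∧ m ≤ st.2.2
    then (st.1 ++ [String.ofList (PySem.Chars.join ['\n'] st.2.1)], ([] : List (List Char)), (0 : Int))
    else st
  let acc := if s1.2.1 ≠ [] then s1.2.2 + 1 else s1.2.2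
  (s1.1, s1.2.1 ++ [line], acc + (line.length : Int))

-- B's body for one input string: split at '\n', regroup, emit the final chunk
def pvInnerB (m : Int) (s : List Char) (outputs : List String) : List String :=
  let r := (PySem.Chars.splitOn s ['\n']).foldl (pvStepB m) (outputs, [], 0)
  r.1 ++ [String.ofList (PySem.Chars.join ['\n'] r.2.1)]

def split_long_texts_alt (inputs : List String) (split_max_length : Int) : List String :=
  inputs.foldl (fun outputs input_str => pvInnerB split_max_length input_str.toList outputs) []

-- ===== PRECONDITION & SPEC =====
-- Pre_ excludes negative split_max_length (outside the splitter's natural domain): there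
-- str.find's negative start counts from the end of the string, and A's chunking is an
-- accident of that wraparound rather than intended behaviour.
def Pre_split_long_texts (inputs : List String) (split_max_length : Int) : Prop :=
  0 ≤ split_max_length
instance (inputs : List String) (split_max_length : Int) : Decidable (Pre_split_long_texts inputs split_max_length) := by unfold Pre_split_long_texts; infer_instance

def pvWitness_split_long_texts : List String × Int := (["ab\ncd"], 2)

def Spec_split_long_texts (inputs : List String) (split_max_length : Int) (out : List String) : Prop := out = split_long_texts_alt inputs split_max_length
instance (inputs : List String) (split_max_length : Int) (out : List String) : Decidable (Spec_split_long_texts inputs split_max_length out) := by unfold Spec_split_long_texts; infer_instance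

-- ===== CLAIM (what is proved, stated in full; the proofs are below) =====
def Claim_equal_split_long_texts : Prop := ∀ (inputs : List String) (split_max_length : Int), Dom_split_long_texts inputs split_max_length → Pre_split_long_texts inputs split_max_length → Spec_split_long_texts inputs split_max_length (split_long_texts inputs split_max_length)

-- ===== LEMMAS AND PROOFS =====

-- a plain structural recursion equal to PySem.Chars.splitOn s ['\n']
def pvSplit (pre : List Char) : List Char → List (List Char)
  | [] => [pre]
  | c :: rest => if c = '\n' then pre :: pvSplit [] rest else pvSplit (pre ++ [c]) rest

lemma pvSplit_ne_nil (l pre : List Char) : pvSplit pre l ≠ [] := by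
  induction l generalizing pre with
  | nil => simp [pvSplit]
  | cons c rest ih =>
    simp only [pvSplit]
    split_ifs
    · simp
    · exact ih _


lemma pvJoin_cons (sep x : List Char) (xs : List (List Char)) (h : xs ≠ []) :
    PySem.Chars.join sep (x :: xs) = x ++ sep ++ PySem.Chars.join sep xs := by
  cases xs with
  | nil => simp at h
  | cons y t => rw [PySem.Chars.join_cons_cons]

lemma pvJoin_append (a b : List (List Char)) (ha : a ≠ []) (hb : b ≠ []) :
    PySem.Chars.join ['\n'] (a ++ b)
      = PySem.Chars.join ['\n'] a ++ '\n' :: PySem.Chars.join ['\n'] b := by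
  induction a with
  | nil => cases ha rfl
  | cons x t ih =>
    cases t with
    | nil => simpa using pvJoin_cons ['\n'] x b hb
    | cons y u =>
      rw [List.cons_append, pvJoin_cons _ x (y :: u ++ b) (by simp),
        ih (by simp), pvJoin_cons _ x (y :: u) (by simp)]
      simp


lemma pvGo_eq : ∀ (fuel : Nat) (l cur : List Char) (acc : List (List Char)), l.length < fuel →
    PySem.Chars.splitOn.go ['\n'] fuel l cur acc = acc.reverse ++ pvSplit cur.reverse l := by
  intro fuel
  induction fuel with
  | zero => intro l cur acc h; omega
  | succ f ih =>
    intro l cur acc h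
    cases l with
    | nil => rw [PySem.Chars.splitOn.go.eq_def]; simp [pvSplit]
    | cons c rest =>
      rw [PySem.Chars.splitOn.go.eq_def]
      by_cases hc : c = '\n'
      · subst hc
        simp only [List.isPrefixOf_cons₂_self, List.isPrefixOf_nil_left, if_true,
          List.length_cons, List.length_nil, List.drop_succ_cons, List.drop_zero]
        rw [ih _ _ _ (by simp at h; omega)]
        simp [pvSplit]
      · have : (['\n'].isPrefixOf (c :: rest)) = false := by
          simp [List.isPrefixOf]; exact fun hh => absurd hh.symm hc
        simp only [this, Bool.false_eq_true, if_false]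
        rw [ih _ _ _ (by simp at h; omega)]
        simp [pvSplit, hc]


lemma pvSplitOn_eq (s : List Char) : PySem.Chars.splitOn s ['\n'] = pvSplit [] s := by
  have h := pvGo_eq (s.length + 1) s [] [] (by omega)
  simpa [PySem.Chars.splitOn] using h


lemma pvSplit_join : ∀ (l pre : List Char),
    PySem.Chars.join ['\n'] (pvSplit pre l) = pre ++ l := by
  intro l
  induction l with
  | nil => intro pre; simp [pvSplit, PySem.Chars.join_singleton]
  | cons c rest ih =>
    intro pre
    simp only [pvSplit]
    split_ifs with hc
    · subst hc
      rw [pvJoin_cons _ _ _ (pvSplit_ne_nil rest []), ih []]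
      simp
    · rw [ih (pre ++ [c])]
      simp


lemma pvSplit_no_nl : ∀ (l pre : List Char), '\n' ∉ pre →
    ∀ x ∈ pvSplit pre l, '\n' ∉ x := by
  intro l
  induction l with
  | nil =>
    intro pre hpre x hx
    simp [pvSplit] at hx
    subst hx; exact hpre
  | cons c rest ih =>
    intro pre hpre x hx
    simp only [pvSplit] at hx
    split_ifs at hx with hc
    · rcases List.mem_cons.mp hx with rfl | hx
      · exact hpre
      · exact ih [] (by simp) x hx
    · exact ih (pre ++ [c]) (by simp [hpre]; exact fun h => hc h.symm) x hx


-- every '\n' inside a join of '\n'-free lines sits at a cut position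
lemma pvNl_pos : ∀ (cur : List (List Char)), (∀ l ∈ cur, '\n' ∉ l) →
    ∀ i (hi : i < (PySem.Chars.join ['\n'] cur).length),
      (PySem.Chars.join ['\n'] cur)[i] = '\n' →
      ∃ k, 0 < k ∧ k < cur.length ∧ i = (PySem.Chars.join ['\n'] (cur.take k)).length := by
  intro cur
  induction cur with
  | nil => intro _ i hi; simp [PySem.Chars.join_nil] at hi
  | cons x t ih =>
    intro hfree i hi hget
    cases t with
    | nil =>
      simp only [PySem.Chars.join_singleton] at hi hget
      exact absurd (hget ▸ List.getElem_mem hi) (hfree x (by simp))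
    | cons y u =>
      simp only [pvJoin_cons _ _ _ (by simp : (y :: u : List (List Char)) ≠ []), List.append_assoc, List.singleton_append] at hi hget
      simp only [List.length_append, List.length_cons] at hi
      rcases Nat.lt_trichotomy i x.length with hc | hc | hc
      · rw [List.getElem_append_left hc] at hget
        exact absurd (hget ▸ List.getElem_mem hc) (hfree x (by simp))
      · refine ⟨1, by omega, by simp, ?_⟩
        simp [PySem.Chars.join_singleton, hc]
      · have hix : x.length ≤ i := by omega
        rw [List.getElem_append_right hix] at hget
        have hpos : 0 < i - x.length := by omega
        have hq : ('\n' :: PySem.Chars.join ['\n'] (y :: u))[i - x.length]? = some '\n' := by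
          rw [List.getElem?_eq_getElem (by simp; omega)]
          simp [hget]
        rw [show i - x.length = (i - x.length - 1) + 1 by omega, List.getElem?_cons_succ] at hq
        have hlt2 : i - x.length - 1 < (PySem.Chars.join ['\n'] (y :: u)).length := by
          by_contra hh
          rw [List.getElem?_eq_none (by omega)] at hq
          simp at hq
        have hget2 : (PySem.Chars.join ['\n'] (y :: u))[i - x.length - 1]'hlt2 = '\n' := by
          rw [List.getElem?_eq_getElem hlt2] at hq
          simpa using hq
        obtain ⟨k, hk0, hklt, hke⟩ := ih (fun l hl => hfree l (by simp [hl])) (i - x.length - 1) hlt2 hget2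
        refine ⟨k + 1, by omega, by simpa using hklt, ?_⟩
        rw [List.take_succ_cons, pvJoin_cons _ _ _ (by
          intro hh
          rw [List.take_eq_nil_iff] at hh
          rcases hh with hh | hh
          · omega
          · simp at hh)]
        simp only [List.length_append, List.length_cons, List.length_nil]
        omega

lemma pvPrefix_single (c : Char) (t : List Char) : [c] <+: t ↔ t.head? = some c := by
  constructor
  · rintro ⟨u, rfl⟩; rfl
  · intro h
    cases t with
    | nil => simp at h
    | cons a u =>
      simp only [List.head?_cons, Option.some.injEq] at h
      exact h ▸ ⟨u, rfl⟩


lemma pvFindFrom_none (s : List Char) (m : Nat)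
    (h : ∀ i, m ≤ i → (hi : i < s.length) → s[i] ≠ '\n') :
    PySem.Chars.findFrom s ['\n'] (m : Int) none = -1 := by
  rcases Nat.lt_or_ge s.length m with hlt | hle
  · simp only [PySem.Chars.findFrom]
    norm_num
    intro h2
    omega
  · rw [PySem.Chars.findFrom_natCast_eq_neg_one_iff s ['\n'] m hle]
    intro hinf
    rw [List.singleton_infix_iff] at hinf
    obtain ⟨j, hj, hjeq⟩ := List.mem_iff_getElem.mp hinf
    rw [List.getElem_drop] at hjeq
    simp only [List.length_drop] at hj
    exact h (m + j) (by omega) (by omega) hjeq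

lemma pvFindFrom_eq (s : List Char) (m jc : Nat) (hm : m ≤ jc) (hjc : jc < s.length)
    (hget : s[jc] = '\n')
    (hbefore : ∀ i, m ≤ i → i < jc → (hi : i < s.length) → s[i] ≠ '\n') :
    PySem.Chars.findFrom s ['\n'] (m : Int) none = (jc : Int) := by
  have hle : m ≤ s.length := by omega
  have hinf : ['\n'] <:+: s.drop m := by
    rw [List.singleton_infix_iff, List.mem_iff_getElem]
    exact ⟨jc - m, by simp [List.length_drop]; omega,
      by simp only [List.getElem_drop]; exact (getElem_congr rfl (by omega) (by omega)).trans hget⟩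
  have hne : PySem.Chars.findFrom s ['\n'] (m : Int) none ≠ -1 := by
    rw [ne_eq, PySem.Chars.findFrom_natCast_eq_neg_one_iff s ['\n'] m hle]
    simpa using hinf
  obtain ⟨h1, h2, h3⟩ := PySem.Chars.findFrom_natCast_spec s ['\n'] m hle hne
  set t := PySem.Chars.findFrom s ['\n'] (m : Int) none with ht
  have hpre : s[t.toNat]? = some '\n' := by
    rw [← List.head?_drop]
    exact (pvPrefix_single _ _).mp h2
  have hlt : t.toNat < s.length := by
    by_contra hh
    rw [List.getElem?_eq_none (by omega)] at hpre
    simp at hpre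
  have hgett : s[t.toNat] = '\n' := by
    rw [List.getElem?_eq_getElem hlt] at hpre
    simpa using hpre
  rcases Nat.lt_trichotomy t.toNat jc with hc | hc | hc
  · exact absurd hgett (hbefore t.toNat (by omega) hc hlt)
  · omega
  · exfalso
    apply h3 jc hm hc
    rw [pvPrefix_single, List.head?_drop, List.getElem?_eq_getElem hjc]
    simp [hget]

lemma pvMain (m : Nat) : ∀ (lines cur : List (List Char)) (outputs : List String),
    (∀ l ∈ cur, '\n' ∉ l) → (∀ l ∈ lines, '\n' ∉ l) →
    (∀ k, 0 < k → k < cur.length → (PySem.Chars.join ['\n'] (cur.take k)).length < m) →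
    (lines.foldl (pvStepB (m : Int))
        (outputs, cur, ((PySem.Chars.join ['\n'] cur).length : Int))).1
      ++ [String.ofList (PySem.Chars.join ['\n']
        (lines.foldl (pvStepB (m : Int))
          (outputs, cur, ((PySem.Chars.join ['\n'] cur).length : Int))).2.1)]
      = pvWhileA (m : Int) (PySem.Chars.join ['\n'] (cur ++ lines)) outputs := by
  intro lines
  induction lines with
  | nil =>
    intro cur outputs hfc _ hinv
    simp only [List.foldl_nil, List.append_nil]
    rw [pvWhileA, dif_pos (pvFindFrom_none _ m (by
      intro i him hi hg
      obtain ⟨k, hk0, hklt, hke⟩ := pvNl_pos cur hfc i hi hg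
      have := hinv k hk0 hklt
      omega))]
  | cons l0 rest ih =>
    intro cur outputs hfc hfl hinv
    simp only [List.foldl_cons]
    by_cases hcut : cur ≠ [] ∧ (m : Int) ≤ ((PySem.Chars.join ['\n'] cur).length : Int)
    · -- the chunk is emitted before this line is appended
      have hstep : pvStepB (m : Int)
            (outputs, cur, ((PySem.Chars.join ['\n'] cur).length : Int)) l0
          = (outputs ++ [String.ofList (PySem.Chars.join ['\n'] cur)], [l0],
              ((PySem.Chars.join ['\n'] [l0]).length : Int)) := by
        simp only [pvStepB, if_pos hcut]
        simp [PySem.Chars.join_singleton]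
      rw [hstep,
        ih [l0] _ (by intro x hx; simp at hx; exact hfl x (by simp [hx]))
          (fun x hx => hfl x (by simp [hx])) (by intro k hk0 hklt; simp at hklt; omega)]
      -- now identify A's step on the joined string
      have hjoin := pvJoin_append cur (l0 :: rest) hcut.1 (by simp)
      have hfind : PySem.Chars.findFrom
            (PySem.Chars.join ['\n'] cur ++ '\n' :: PySem.Chars.join ['\n'] (l0 :: rest))
            ['\n'] (m : Int) none = ((PySem.Chars.join ['\n'] cur).length : Int) := by
        have hm2 : m ≤ (PySem.Chars.join ['\n'] cur).length := by exact_mod_cast hcut.2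
        have hjc2 : (PySem.Chars.join ['\n'] cur).length
            < (PySem.Chars.join ['\n'] cur ++ '\n' :: PySem.Chars.join ['\n'] (l0 :: rest)).length := by
          simp
        have hget2 : (PySem.Chars.join ['\n'] cur
              ++ '\n' :: PySem.Chars.join ['\n'] (l0 :: rest))[(PySem.Chars.join ['\n'] cur).length]'hjc2
            = '\n' := by
          rw [List.getElem_append_right (Nat.le_refl _)]
          simp
        refine pvFindFrom_eq _ m _ hm2 hjc2 hget2 ?_
        intro i him hilt hi
        rw [List.getElem_append_left hilt]
        intro hg
        obtain ⟨k, hk0, hklt, hke⟩ := pvNl_pos cur hfc i hilt hg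
        have h1 := hinv k hk0 hklt
        omega
      rw [hjoin]
      conv_rhs => rw [pvWhileA]
      rw [dif_neg (by rw [hfind]; omega)]
      rw [hfind]
      have htoNat : (((PySem.Chars.join ['\n'] cur).length : Int) + 1).toNat
          = (PySem.Chars.join ['\n'] cur).length + 1 := by omega
      rw [PySem.List.slice_to _ (by positivity), PySem.List.slice_from _ (by positivity),
        Int.toNat_natCast, htoNat, List.take_left]
      have hdrop : List.drop ((PySem.Chars.join ['\n'] cur).length + 1)
            (PySem.Chars.join ['\n'] cur ++ '\n' :: PySem.Chars.join ['\n'] (l0 :: rest))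
          = PySem.Chars.join ['\n'] (l0 :: rest) := by
        rw [show PySem.Chars.join ['\n'] cur ++ '\n' :: PySem.Chars.join ['\n'] (l0 :: rest)
            = (PySem.Chars.join ['\n'] cur ++ ['\n']) ++ PySem.Chars.join ['\n'] (l0 :: rest) by
          simp]
        rw [show (PySem.Chars.join ['\n'] cur).length + 1
            = (PySem.Chars.join ['\n'] cur ++ ['\n']).length by simp]
        exact List.drop_left
      rw [hdrop]
      simp
    · -- the line is appended to the current chunk
      have hstep : pvStepB (m : Int)
            (outputs, cur, ((PySem.Chars.join ['\n'] cur).length : Int)) l0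
          = (outputs, cur ++ [l0],
              ((PySem.Chars.join ['\n'] (cur ++ [l0])).length : Int)) := by
        simp only [pvStepB, if_neg hcut]
        by_cases hc0 : cur = []
        · subst hc0
          simp [PySem.Chars.join_nil, PySem.Chars.join_singleton]
        · simp only [if_pos hc0]
          rw [pvJoin_append cur [l0] hc0 (by simp)]
          simp only [PySem.Chars.join_singleton, List.length_append, List.length_cons]
          push_cast
          have : ((PySem.Chars.join ['\n'] cur).length : Int) + 1 + (l0.length : Int)
              = ((PySem.Chars.join ['\n'] cur).length : Int) + ((l0.length : Int) + 1) := by ring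
          rw [this]
      have hlt : cur = [] ∨ (PySem.Chars.join ['\n'] cur).length < m := by
        rcases not_and_or.mp hcut with hh | hh
        · exact Or.inl (not_not.mp hh)
        · exact Or.inr (by exact_mod_cast not_le.mp hh)
      rw [hstep, ih (cur ++ [l0]) outputs
        (by intro x hx; rcases List.mem_append.mp hx with hx | hx
            · exact hfc x hx
            · simp at hx; exact hfl x (by simp [hx]))
        (fun x hx => hfl x (by simp [hx]))
        (by intro k hk0 hklt
            simp only [List.length_append, List.length_cons, List.length_nil] at hklt
            have hkle : k ≤ cur.length := by omega
            rw [List.take_append_of_le_length hkle]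
            rcases Nat.lt_or_ge k cur.length with hk | hk
            · exact hinv k hk0 hk
            · have hkeq : k = cur.length := by omega
              subst hkeq
              rw [List.take_length]
              rcases hlt with hh | hh
              · subst hh; simp at hk0
              · exact hh)]
      rw [show (cur ++ [l0]) ++ rest = cur ++ l0 :: rest by simp]


lemma pvInner_eq (m : Nat) (s : List Char) (outputs : List String) :
    pvInnerB (m : Int) s outputs = pvWhileA (m : Int) s outputs := by
  unfold pvInnerB
  rw [pvSplitOn_eq]
  have h := pvMain m (pvSplit [] s) [] outputs (by simp)
    (pvSplit_no_nl s [] (by simp)) (by intro k hk0 hklt; simp at hklt)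
  rw [List.nil_append, pvSplit_join s []] at h
  simpa [PySem.Chars.join_nil] using h

lemma pvFold_eq (m : Nat) : ∀ (xs : List String) (out : List String),
    xs.foldl (fun outputs input_str => pvWhileA (m : Int) input_str.toList outputs) out
      = xs.foldl (fun outputs input_str => pvInnerB (m : Int) input_str.toList outputs) out := by
  intro xs
  induction xs with
  | nil => intro out; rfl
  | cons x t ih => intro out; simp only [List.foldl_cons, pvInner_eq, ih]

-- ===== VERDICT (by name: the statement is the Claim_ definition above) =====
theorem split_long_texts_spec : Claim_equal_split_long_texts := by
  intro inputs m _hdom hpre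
  unfold Spec_split_long_texts split_long_texts split_long_texts_alt
  obtain ⟨n, rfl⟩ : ∃ n : Nat, m = (n : Int) := ⟨m.toNat, (Int.toNat_of_nonneg hpre).symm⟩
  exact pvFold_eq n inputs []
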